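-- pv_equiv track=rewrite | github.com/epiphone/tiea207_c2264 | scraper_wrapper.py | rajaa_tulokset
-- ===== SOURCE A (Python) =====
-- from math import ceil
--
-- def rajaa_tulokset(tulos, max_lkm, lahtoaika, saapumisaika):
--     """
--     Rajaa hakutuloksista halutun määrän tuloksia.
--     """
--     if len(tulos) <= max_lkm:
--         return tulos
--
--     if lahtoaika:
--         aika = lahtoaika.split()[1]
--         attr = "lahtoaika"
--     else:
--         aika = saapumisaika.split()[1]
--         attr = "saapumisaika"
--
--     ret = None
--
--     for i, matka in enumerate(tulos):
--         if matka[attr] > aika: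
--             askeleet_vas = min(int(ceil((max_lkm - 1) / 2.0)), i)
--             askeleet_oik = max_lkm - 1 - askeleet_vas
--             askeleet_vas += (i + askeleet_oik + 1) - len(tulos)
--             ret = tulos[i - askeleet_vas:i + askeleet_oik + 1]
--
--     if not ret:
--         ret = tulos[-max_lkm:]
--
--     assert len(ret) == min(max_lkm, len(tulos))  # TODO debug
--     return ret
-- ===== SOURCE B (Python) =====
-- def rajaa_tulokset(tulos, max_lkm, lahtoaika, saapumisaika):
--     """
--     Rajaa hakutuloksista halutun maaran tuloksia.
--
--     Whenever A's window computation succeeds (the assert passes), the window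
--     either reaches the end of the list or is empty and falls back to the tail
--     slice, so the result is always the last max_lkm elements.
--     """
--     if len(tulos) <= max_lkm:
--         return tulos
--     return tulos[-max_lkm:]
-- ===== Notes on version B (the rewrite author's own statement) =====
-- stated objective: simpler
-- what changed: A scans every row recomputing a 'centered' window whose start always collapses to len-max_lkm, so whenever A returns (assert passes or the empty/None window falls back) the value is exactly the last max_lkm elements; B returns that tail slice directly with no scan.
import Mathlib
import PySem

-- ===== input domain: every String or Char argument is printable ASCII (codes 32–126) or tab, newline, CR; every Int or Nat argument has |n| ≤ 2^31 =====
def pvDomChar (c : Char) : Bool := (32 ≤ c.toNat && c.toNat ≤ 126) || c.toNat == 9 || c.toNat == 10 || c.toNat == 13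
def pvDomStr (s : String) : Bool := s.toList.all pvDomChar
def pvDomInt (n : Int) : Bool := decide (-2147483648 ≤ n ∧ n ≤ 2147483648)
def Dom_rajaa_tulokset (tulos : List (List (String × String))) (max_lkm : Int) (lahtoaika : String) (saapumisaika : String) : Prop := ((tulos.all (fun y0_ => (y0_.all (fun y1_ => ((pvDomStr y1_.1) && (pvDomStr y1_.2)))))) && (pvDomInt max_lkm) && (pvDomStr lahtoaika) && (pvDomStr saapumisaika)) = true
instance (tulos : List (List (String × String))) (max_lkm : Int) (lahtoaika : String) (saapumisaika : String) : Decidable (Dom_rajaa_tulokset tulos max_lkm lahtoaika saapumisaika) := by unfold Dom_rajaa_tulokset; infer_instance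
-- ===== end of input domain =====

-- B simplifies A: whenever A returns at all, its window collapses to the last max_lkm
-- elements, so B returns that tail slice directly (objective: simpler).

-- shared helpers (used by both the port of A and Pre_)
-- int(ceil(x / 2.0)) for an int x (exact: the float quotient of a small int is exact)
def pvCeilHalf (x : Int) : Int := -(PySem.Int.floordiv (-x) 2)
-- 'lahtoaika if lahtoaika else saapumisaika' and the chosen attribute name
def pvTimeStr (l s : String) : String := if l ≠ "" then l else s
def pvAttr (l : String) : String := if l ≠ "" then "lahtoaika" else "saapumisaika"

-- ===== PORT A =====
-- one loop step of A's 'for i, matka in enumerate(tulos)'; outer Option = no exception so far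
-- (inner Option = Python's ret, None before any match); KeyError on matka[attr] -> none
-- (a row is a dict with unique keys; List.lookup is the first-match association lookup)
def pvStepA (tulos : List (List (String × String))) (m : Int) (attr aika : String)
    (st : Option (Option (List (List (String × String))))) (p : Int × List (String × String)) :
    Option (Option (List (List (String × String)))) :=
  match st with
  | none => none
  | some ret =>
    match List.lookup attr p.2 with
    | none => none
    | some v =>
      if PySem.Chars.strLt aika.toList v.toList then
        let vas0 := min (pvCeilHalf (m - 1)) p.1
        let oik := m - 1 - vas0
        let vas := vas0 + (p.1 + oik + 1 - (tulos.length : Int))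
        some (some (PySem.List.slice tulos (some (p.1 - vas)) (some (p.1 + oik + 1))))
      else some ret

-- literal transliteration of A; 'none' marks the inputs where the Python raises
-- (IndexError on split()[1], KeyError on matka[attr], AssertionError on the final assert)
def rajaaCoreA (tulos : List (List (String × String))) (max_lkm : Int) (lahtoaika : String)
    (saapumisaika : String) : Option (List (List (String × String))) :=
  if (tulos.length : Int) ≤ max_lkm then some tulos
  else
    match PySem.List.pyGet? (PySem.Str.split₀ (pvTimeStr lahtoaika saapumisaika)) 1 with
    | none => none
    | some aika =>
      match (PySem.List.enumerate tulos 0).foldl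
              (pvStepA tulos max_lkm (pvAttr lahtoaika) aika) (some none) with
      | none => none
      | some ret =>
        let ret2 :=
          match ret with
          | none => PySem.List.slice tulos (some (-max_lkm)) none
          | some r => if r.isEmpty then PySem.List.slice tulos (some (-max_lkm)) none else r
        if (ret2.length : Int) = min max_lkm (tulos.length : Int) then some ret2 else none

def rajaa_tulokset (tulos : List (List (String × String))) (max_lkm : Int) (lahtoaika : String) (saapumisaika : String) : List (List (String × String)) :=
  (rajaaCoreA tulos max_lkm lahtoaika saapumisaika).getD []

-- ===== PORT B =====
def rajaa_tulokset_alt (tulos : List (List (String × String))) (max_lkm : Int) (lahtoaika : String) (saapumisaika : String) : List (List (String × String)) :=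
  if (tulos.length : Int) ≤ max_lkm then tulos
  else PySem.List.slice tulos (some (-max_lkm)) none

-- ===== PRECONDITION & SPEC =====
-- the last (index, row) whose attribute exceeds aika (a missing key reads as "" here;
-- Pre_ only consults it when every row has the key)
def pvLastHit (tulos : List (List (String × String))) (attr aika : String) : Option (Int × List (String × String)) :=
  ((PySem.List.enumerate tulos 0).filter
    (fun p => PySem.Chars.strLt aika.toList ((List.lookup attr p.2).getD "").toList)).getLast?

-- Pre_ excludes exactly the inputs on which A raises: max_lkm < 1 with a longer list, a selected
-- time string without a second token (IndexError), a row missing the attribute key (KeyError),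
-- and a last matching row whose window ends strictly inside the list (AssertionError on the debug assert).
def Pre_rajaa_tulokset (tulos : List (List (String × String))) (max_lkm : Int) (lahtoaika : String) (saapumisaika : String) : Prop :=
  (tulos.length : Int) ≤ max_lkm ∨
  (1 ≤ max_lkm ∧
   2 ≤ (PySem.Str.split₀ (pvTimeStr lahtoaika saapumisaika)).length ∧
   (∀ row ∈ tulos, (List.lookup (pvAttr lahtoaika) row).isSome) ∧
   (pvLastHit tulos (pvAttr lahtoaika)
      ((PySem.Str.split₀ (pvTimeStr lahtoaika saapumisaika)).getD 1 "")).all (fun p =>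
      decide (p.1 + max_lkm - min (pvCeilHalf (max_lkm - 1)) p.1 ≤ (tulos.length : Int) - max_lkm ∨
              (tulos.length : Int) ≤ p.1 + max_lkm - min (pvCeilHalf (max_lkm - 1)) p.1)) = true)
instance (tulos : List (List (String × String))) (max_lkm : Int) (lahtoaika : String) (saapumisaika : String) : Decidable (Pre_rajaa_tulokset tulos max_lkm lahtoaika saapumisaika) := by
  unfold Pre_rajaa_tulokset; infer_instance

def pvWitness_rajaa_tulokset : (List (List (String × String))) × Int × String × String :=
  ([[("lahtoaika", "08:00")], [("lahtoaika", "09:00")], [("lahtoaika", "10:00")]], 2, "1.1. 08:30", "")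

def Spec_rajaa_tulokset (tulos : List (List (String × String))) (max_lkm : Int) (lahtoaika : String) (saapumisaika : String) (out : List (List (String × String))) : Prop := out = rajaa_tulokset_alt tulos max_lkm lahtoaika saapumisaika
instance (tulos : List (List (String × String))) (max_lkm : Int) (lahtoaika : String) (saapumisaika : String) (out : List (List (String × String))) : Decidable (Spec_rajaa_tulokset tulos max_lkm lahtoaika saapumisaika out) := by unfold Spec_rajaa_tulokset; infer_instance

-- ===== CLAIM (what is proved, stated in full; the proofs are below) =====
def Claim_equal_rajaa_tulokset : Prop := ∀ (tulos : List (List (String × String))) (max_lkm : Int) (lahtoaika : String) (saapumisaika : String), Dom_rajaa_tulokset tulos max_lkm lahtoaika saapumisaika → Pre_rajaa_tulokset tulos max_lkm lahtoaika saapumisaika → Spec_rajaa_tulokset tulos max_lkm lahtoaika saapumisaika (rajaa_tulokset tulos max_lkm lahtoaika saapumisaika)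
-- ===== LEMMAS AND PROOFS =====

-- bounds on int(ceil((m-1)/2.0))
theorem pvCeilHalf_bounds (m : Int) (hm : 1 ≤ m) :
    0 ≤ pvCeilHalf (m - 1) ∧ pvCeilHalf (m - 1) ≤ m - 1 := by
  unfold pvCeilHalf
  have h1 := PySem.Int.floordiv_mul_add_mod (-(m - 1)) 2
  have h2 := PySem.Int.mod_nonneg (-(m - 1)) (b := 2) (by norm_num)
  have h3 := PySem.Int.mod_lt (-(m - 1)) (b := 2) (by norm_num)
  omega

-- length of the tail slice tulos[-m:] for 1 ≤ m ≤ len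
theorem pvTailSlice_eq (tulos : List (List (String × String))) (m : Int)
    (h1 : 1 ≤ m) (h2 : m ≤ (tulos.length : Int)) :
    PySem.List.slice tulos (some (-m)) none = tulos.drop (tulos.length - m.toNat) ∧
    (tulos.drop (tulos.length - m.toNat)).length = m.toNat := by
  have hm : -m = -((m.toNat : Nat) : Int) := by omega
  rw [hm, PySem.List.slice_from_neg_natCast _ _ (by omega)]
  refine ⟨rfl, ?_⟩
  rw [List.length_drop]
  omega

-- the fold of A's loop, characterised by the LAST matching index
theorem pvFoldA_eq (tulos : List (List (String × String))) (m : Int) (attr aika : String) :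
    ∀ (xs : List (List (String × String))) (s : Int) (r0 : Option (List (List (String × String)))),
      (∀ row ∈ xs, (List.lookup attr row).isSome) →
      (PySem.List.enumerate xs s).foldl (pvStepA tulos m attr aika) (some r0) =
        some (match ((PySem.List.enumerate xs s).filter
                      (fun p => PySem.Chars.strLt aika.toList ((List.lookup attr p.2).getD "").toList)).getLast? with
              | none => r0
              | some p =>
                some (PySem.List.slice tulos
                  (some (p.1 - (min (pvCeilHalf (m - 1)) p.1 + (p.1 + (m - 1 - min (pvCeilHalf (m - 1)) p.1) + 1 - (tulos.length : Int)))))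
                  (some (p.1 + (m - 1 - min (pvCeilHalf (m - 1)) p.1) + 1)))) := by
  intro xs
  induction xs with
  | nil => intro s r0 _; simp [PySem.List.enumerate_nil]
  | cons x xs ih =>
    intro s r0 h
    have hx : (List.lookup attr x).isSome := h x (List.mem_cons_self)
    obtain ⟨v, hv⟩ := Option.isSome_iff_exists.mp hx
    have hrest : ∀ row ∈ xs, (List.lookup attr row).isSome :=
      fun r hr => h r (List.mem_cons_of_mem _ hr)
    rw [PySem.List.enumerate_cons, List.foldl_cons, List.filter_cons]
    by_cases hc : PySem.Chars.strLt aika.toList v.toList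
    · have hstep : pvStepA tulos m attr aika (some r0) (s, x) =
          some (some (PySem.List.slice tulos
            (some (s - (min (pvCeilHalf (m - 1)) s + (s + (m - 1 - min (pvCeilHalf (m - 1)) s) + 1 - (tulos.length : Int)))))
            (some (s + (m - 1 - min (pvCeilHalf (m - 1)) s) + 1)))) := by
        simp [pvStepA, hv, hc]
      rw [hstep, ih (s + 1) _ hrest]
      have hcond : (fun p : Int × List (String × String) =>
          PySem.Chars.strLt aika.toList ((List.lookup attr p.2).getD "").toList) (s, x) = true := by
        simp [hv, hc]
      rw [if_pos hcond]
      cases hl : ((PySem.List.enumerate xs (s + 1)).filter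
          (fun p => PySem.Chars.strLt aika.toList ((List.lookup attr p.2).getD "").toList)).getLast? with
      | none =>
        have : (PySem.List.enumerate xs (s + 1)).filter
            (fun p => PySem.Chars.strLt aika.toList ((List.lookup attr p.2).getD "").toList) = [] :=
          List.getLast?_eq_none_iff.mp hl
        rw [this]
        simp
      | some p =>
        simp [List.getLast?_cons, hl]
    · have hstep : pvStepA tulos m attr aika (some r0) (s, x) = some r0 := by
        simp [pvStepA, hv, hc]
      have hcond : (fun p : Int × List (String × String) =>
          PySem.Chars.strLt aika.toList ((List.lookup attr p.2).getD "").toList) (s, x) = false := by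
        simp [hv, hc]
      rw [hstep, if_neg (by simp [hcond]), ih (s + 1) r0 hrest]

-- toks[1] read via pyGet? equals the getD form used in Pre_
theorem pvGetSecond (toks : List String) (h : 2 ≤ toks.length) :
    PySem.List.pyGet? toks 1 = some (toks.getD 1 "") := by
  match toks, h with
  | a :: b :: rest, _ => simp [PySem.List.pyGet?, PySem.List.pyIdx?, List.getD]

-- ===== VERDICT (by name: the statement is the Claim_ definition above) =====
theorem rajaa_tulokset_spec : Claim_equal_rajaa_tulokset := by
  intro tulos m l s _ hpre
  unfold Spec_rajaa_tulokset rajaa_tulokset rajaa_tulokset_alt rajaaCoreA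
  by_cases hnm : (tulos.length : Int) ≤ m
  · simp [hnm]
  · rw [if_neg hnm]
    unfold Pre_rajaa_tulokset at hpre
    rcases hpre with h | ⟨hm, htoks, hkeys, hlast⟩
    · exact absurd h hnm
    rw [if_neg hnm, pvGetSecond _ htoks]
    dsimp only
    set aika := (PySem.Str.split₀ (pvTimeStr l s)).getD 1 "" with haika
    rw [pvFoldA_eq tulos m (pvAttr l) aika tulos 0 none hkeys]
    dsimp only
    have hlen : (tulos.drop (tulos.length - m.toNat)).length = m.toNat :=
      (pvTailSlice_eq tulos m hm (by omega)).2
    have htail : PySem.List.slice tulos (some (-m)) none = tulos.drop (tulos.length - m.toNat) :=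
      (pvTailSlice_eq tulos m hm (by omega)).1
    have hassert : ((tulos.drop (tulos.length - m.toNat)).length : Int) = min m (tulos.length : Int) := by
      rw [hlen]; omega
    cases hL : pvLastHit tulos (pvAttr l) aika with
    | none =>
      rw [show ((PySem.List.enumerate tulos 0).filter
            (fun p => PySem.Chars.strLt aika.toList ((List.lookup (pvAttr l) p.2).getD "").toList)).getLast? =
          pvLastHit tulos (pvAttr l) aika from rfl, hL]
      simp only [htail]
      rw [if_pos hassert]
      simp
    | some p =>
      rw [show ((PySem.List.enumerate tulos 0).filter
            (fun p => PySem.Chars.strLt aika.toList ((List.lookup (pvAttr l) p.2).getD "").toList)).getLast? =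
          pvLastHit tulos (pvAttr l) aika from rfl, hL]
      dsimp only
      -- facts about the matching index p.1
      have hpmem : p ∈ (PySem.List.enumerate tulos 0).filter
          (fun q => PySem.Chars.strLt aika.toList ((List.lookup (pvAttr l) q.2).getD "").toList) := by
        have := hL; unfold pvLastHit at this
        exact List.mem_of_getLast? this
      have hpen : p ∈ PySem.List.enumerate tulos 0 := (List.mem_filter.mp hpmem).1
      obtain ⟨k, hk, hpk⟩ := (PySem.List.mem_enumerate_iff _ _ _).mp hpen
      have hp1 : p.1 = (k : Int) := by rw [hpk]; simp
      have hp1b : 0 ≤ p.1 ∧ p.1 < (tulos.length : Int) :=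
        ⟨by rw [hp1]; positivity, by rw [hp1]; exact_mod_cast hk⟩
      -- the Pre_ window condition at p
      rw [hL] at hlast
      simp only [Option.all_some, decide_eq_true_eq] at hlast
      -- arithmetic: the slice start is len - m, the end e = p.1 + m - vas0
      have hch := pvCeilHalf_bounds m hm
      set c := pvCeilHalf (m - 1) with hc
      have hv0 : 0 ≤ min c p.1 ∧ min c p.1 ≤ m - 1 ∧ min c p.1 ≤ p.1 := by
        constructor
        · exact le_min hch.1 hp1b.1
        · exact ⟨le_trans (min_le_left _ _) hch.2, min_le_right _ _⟩
      have hstart : p.1 - (min c p.1 + (p.1 + (m - 1 - min c p.1) + 1 - (tulos.length : Int))) =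
          (tulos.length : Int) - m := by omega
      have he0 : (0 : Int) ≤ p.1 + (m - 1 - min c p.1) + 1 := by omega
      have hs0 : (0 : Int) ≤ (tulos.length : Int) - m := by omega
      simp only [hstart, PySem.List.slice_toNat tulos hs0 he0]
      have hsn : ((tulos.length : Int) - m).toNat = tulos.length - m.toNat := by omega
      rcases hlast with hsmall | hbig
      · -- window empty: the slice is [], A falls back to the tail slice
        have hz : (p.1 + (m - 1 - min c p.1) + 1).toNat - ((tulos.length : Int) - m).toNat = 0 := by
          omega
        simp only [hz]
        simp only [List.take_zero, List.isEmpty_nil, if_true, htail]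
        rw [if_pos hassert]
        simp
      · -- window reaches the end: the slice IS the last m elements
        have hdl : (tulos.drop ((tulos.length : Int) - m).toNat).length = m.toNat := by
          rw [List.length_drop]; omega
        have htake : (tulos.drop (((tulos.length : Int) - m).toNat)).take
            ((p.1 + (m - 1 - min c p.1) + 1).toNat - ((tulos.length : Int) - m).toNat) =
            tulos.drop (((tulos.length : Int) - m).toNat) := by
          apply List.take_of_length_le
          rw [hdl]; omega
        simp only [htake]
        simp only [hsn]
        have hne : (tulos.drop (tulos.length - m.toNat)).isEmpty = false := by
          rw [List.isEmpty_eq_false_iff, ← List.length_pos_iff, hlen]; omega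
        simp only [hne, Bool.false_eq_true, if_false]
        rw [if_pos (by rw [hlen]; omega)]
        simp [htail]
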